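-- pv_equiv track=rewrite | github.com/Predator5959/Cherniavskyi_homework | Lesson 9.py | reverse_par_list
-- ===== SOURCE A (Python) =====
-- def reverse_par_list(my_list):
--     new_list = []
--     for condition, item in enumerate(my_list):
--         if condition % 2 == 0:
--             new_list.append(item)
--         else:
--             new_list.append(item[::-1])
--     return new_list
-- ===== SOURCE B (Python) =====
-- def reverse_par_list(my_list):
--     new = list(my_list)
--     new[1::2] = [x[::-1] for x in my_list[1::2]]
--     return new
-- ===== Notes on version B (the rewrite author's own statement) =====
-- stated objective: idiomatic
-- what changed: Replaces the enumerate loop with its per-element parity branch by a branch-free strided slice assignment: copy the list, then overwrite the odd-index positions in one batch with the reversed elements of my_list[1::2].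
import Mathlib
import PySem

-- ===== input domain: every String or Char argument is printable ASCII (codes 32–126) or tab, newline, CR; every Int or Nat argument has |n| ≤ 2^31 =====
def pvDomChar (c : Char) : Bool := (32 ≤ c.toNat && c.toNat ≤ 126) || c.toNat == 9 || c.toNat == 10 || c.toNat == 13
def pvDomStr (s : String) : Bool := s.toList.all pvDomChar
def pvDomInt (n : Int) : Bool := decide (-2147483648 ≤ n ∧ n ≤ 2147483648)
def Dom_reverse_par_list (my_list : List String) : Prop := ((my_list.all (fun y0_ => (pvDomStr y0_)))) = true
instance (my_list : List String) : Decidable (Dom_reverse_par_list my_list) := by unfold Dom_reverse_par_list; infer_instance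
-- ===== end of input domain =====

-- B is the idiomatic strided-slice-assignment version of A's enumerate-and-branch loop; return values agree on all inputs.

-- ===== PORT A =====
-- new_list = []; for condition, item in enumerate(my_list): append item or item[::-1]
def reverse_par_list (my_list : List String) : List String :=
  (PySem.List.enumerate my_list 0).foldl
    (fun new_list ci =>
      if ci.1 % 2 == 0 then new_list ++ [ci.2]
      else new_list ++ [(PySem.Str.slice? ci.2 none none (-1)).getD ""])
    []

-- ===== PORT B =====
-- exact hand port of the strided slice my_list[1::2]: after dropping the head, take every second element
def pvStride2 : List String → List String
  | [] => []
  | x :: rest => x :: pvStride2 (rest.drop 1)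
termination_by xs => xs.length
decreasing_by simp

-- exact hand port of slice assignment new[1::2] = repl: overwrite positions 1,3,5,… with repl in order
def pvOddAssign : List String → List String → List String
  | [], _ => []
  | [x], _ => [x]
  | x :: _ :: rest, [] => x :: rest            -- unreachable here: repl has exactly the length of new[1::2]
  | x :: _ :: rest, r :: rs => x :: r :: pvOddAssign rest rs

def reverse_par_list_alt (my_list : List String) : List String :=
  pvOddAssign my_list
    ((pvStride2 (my_list.drop 1)).map (fun x => (PySem.Str.slice? x none none (-1)).getD ""))

-- ===== PRECONDITION & SPEC =====
def Spec_reverse_par_list (my_list : List String) (out : List String) : Prop := out = reverse_par_list_alt my_list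
instance (my_list : List String) (out : List String) : Decidable (Spec_reverse_par_list my_list out) := by unfold Spec_reverse_par_list; infer_instance

-- ===== CLAIM (what is proved, stated in full; the proofs are below) =====
def Claim_equal_reverse_par_list : Prop := ∀ (my_list : List String), Dom_reverse_par_list my_list → Spec_reverse_par_list my_list (reverse_par_list my_list)

-- ===== LEMMAS AND PROOFS =====

def pvRev (s : String) : String := (PySem.Str.slice? s none none (-1)).getD ""

-- index-annotated normal form of A's loop body
theorem pvStride2_cons (x : String) (rest : List String) :
    pvStride2 (x :: rest) = x :: pvStride2 (rest.drop 1) := by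
  rw [pvStride2]

-- index-annotated normal form of A's loop body
def pvBody : List String → Int → List String
  | [], _ => []
  | x :: xs, s => (if s % 2 == 0 then x else pvRev x) :: pvBody xs (s + 1)

theorem pvFoldl_eq_body (xs : List String) (s : Int) (acc : List String) :
    (PySem.List.enumerate xs s).foldl
      (fun new_list ci =>
        if ci.1 % 2 == 0 then new_list ++ [ci.2]
        else new_list ++ [(PySem.Str.slice? ci.2 none none (-1)).getD ""])
      acc = acc ++ pvBody xs s := by
  induction xs generalizing s acc with
  | nil => simp [PySem.List.enumerate_nil, pvBody]
  | cons x xs ih =>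
    rw [PySem.List.enumerate_cons, List.foldl_cons, ih]
    by_cases h : s % 2 == 0 <;> simp [h, pvBody, pvRev, List.append_assoc]

theorem pvBody_parity (xs : List String) (s t : Int) (h : s % 2 = t % 2) :
    pvBody xs s = pvBody xs t := by
  induction xs generalizing s t with
  | nil => rfl
  | cons x xs ih =>
    simp only [pvBody]
    rw [ih (s + 1) (t + 1) (by omega)]
    have : (s % 2 == 0) = (t % 2 == 0) := by rw [h]
    rw [this]

theorem pvAlt_eq_body : ∀ (n : Nat) (xs : List String), xs.length ≤ n →
    pvOddAssign xs ((pvStride2 (xs.drop 1)).map pvRev) = pvBody xs 0 := by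
  intro n
  induction n with
  | zero =>
    intro xs h
    have : xs = [] := List.eq_nil_of_length_eq_zero (Nat.le_zero.mp h)
    subst this; rfl
  | succ n ih =>
    intro xs h
    match xs with
    | [] => rfl
    | [x] => rfl
    | x :: y :: rest =>
      have e1 : pvOddAssign (x :: y :: rest) ((pvStride2 ((x :: y :: rest).drop 1)).map pvRev)
          = x :: pvRev y :: pvOddAssign rest ((pvStride2 (rest.drop 1)).map pvRev) := by
        rw [List.drop_one, List.tail_cons, pvStride2_cons, List.map_cons]; rfl
      have e2 : pvBody (x :: y :: rest) 0 = x :: pvRev y :: pvBody rest 2 := by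
        simp only [pvBody]; norm_num
      rw [e1, e2, ih rest (by simp at h; omega), pvBody_parity rest 0 2 (by decide)]

-- ===== VERDICT (by name: the statement is the Claim_ definition above) =====
theorem reverse_par_list_spec : Claim_equal_reverse_par_list := by
  intro my_list _
  unfold Spec_reverse_par_list reverse_par_list reverse_par_list_alt
  rw [pvFoldl_eq_body, List.nil_append,
    show (fun x => (PySem.Str.slice? x none none (-1)).getD "") = pvRev from rfl,
    pvAlt_eq_body my_list.length my_list (le_refl _)]
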